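-- pv_equiv track=rewrite | github.com/WitoldFracek/AdventOfCode2025 | day4/day4.py | flag_rolls_for_removal
-- ===== SOURCE A (Python) =====
-- from typing import List, Tuple
--
-- def convolve(matrix: List[List[int]], kernel: List[List[int]]) -> List[List[int]]:
--     m_rows = len(matrix)
--     m_cols = len(matrix[0]) if m_rows > 0 else 0
--     k_rows = len(kernel)
--     k_cols = len(kernel[0]) if k_rows > 0 else 0
--     pad_height = k_rows // 2
--     pad_width = k_cols // 2
--
--     padded_matrix = [[0] * (m_cols + 2 * pad_width) for _ in range(pad_height)]
--     for row in matrix: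
--         padded_matrix.append([0] * pad_width + row + [0] * pad_width)
--     padded_matrix.extend([[0] * (m_cols + 2 * pad_width) for _ in range(pad_height)])
--
--     output = [[0 for _ in range(m_cols)] for _ in range(m_rows)]
--     for i in range(m_rows):
--         for j in range(m_cols):
--             conv_sum = 0
--             for ki in range(k_rows):
--                 for kj in range(k_cols):
--                     conv_sum += (padded_matrix[i + ki][j + kj] * kernel[ki][kj])
--             output[i][j] = conv_sum
--     return output
--
-- def flag_rolls_for_removal(matrix: List[List[int]], kernel: List[List[int]]) -> List[List[bool]]:
--     convolved = convolve(matrix, kernel)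
--     m_rows = len(matrix)
--     m_cols = len(matrix[0]) if m_rows > 0 else 0
--     removal_flags = [[False for _ in range(m_cols)] for _ in range(m_rows)]
--     for i in range(m_rows):
--         for j in range(m_cols):
--             if 100 <= convolved[i][j] < 104:
--                 removal_flags[i][j] = True
--     return removal_flags
-- ===== SOURCE B (Python) =====
-- from typing import List
--
-- def flag_rolls_for_removal(matrix: List[List[int]], kernel: List[List[int]]) -> List[List[bool]]:
--     m_rows = len(matrix)
--     m_cols = len(matrix[0]) if m_rows > 0 else 0
--     k_rows = len(kernel)
--     k_cols = len(kernel[0]) if k_rows > 0 else 0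
--     pad_height = k_rows // 2
--     pad_width = k_cols // 2
--     flags = []
--     for i in range(m_rows):
--         row_flags = []
--         for j in range(m_cols):
--             conv_sum = 0
--             for ki in range(k_rows):
--                 r = i + ki - pad_height
--                 if 0 <= r < m_rows:
--                     row = matrix[r]
--                     for kj in range(k_cols):
--                         c = j + kj - pad_width
--                         if 0 <= c < len(row):
--                             conv_sum += row[c] * kernel[ki][kj]
--             row_flags.append(100 <= conv_sum < 104)
--         flags.append(row_flags)
--     return flags
-- ===== Notes on version B (the rewrite author's own statement) =====
-- stated objective: simpler
-- what changed: B drops A's padded-matrix construction and the intermediate convolved matrix: a single fused pass computes each cell's convolution sum with bounds-checked direct reads (out-of-range treated as 0) and flags the cell immediately.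
import Mathlib
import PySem

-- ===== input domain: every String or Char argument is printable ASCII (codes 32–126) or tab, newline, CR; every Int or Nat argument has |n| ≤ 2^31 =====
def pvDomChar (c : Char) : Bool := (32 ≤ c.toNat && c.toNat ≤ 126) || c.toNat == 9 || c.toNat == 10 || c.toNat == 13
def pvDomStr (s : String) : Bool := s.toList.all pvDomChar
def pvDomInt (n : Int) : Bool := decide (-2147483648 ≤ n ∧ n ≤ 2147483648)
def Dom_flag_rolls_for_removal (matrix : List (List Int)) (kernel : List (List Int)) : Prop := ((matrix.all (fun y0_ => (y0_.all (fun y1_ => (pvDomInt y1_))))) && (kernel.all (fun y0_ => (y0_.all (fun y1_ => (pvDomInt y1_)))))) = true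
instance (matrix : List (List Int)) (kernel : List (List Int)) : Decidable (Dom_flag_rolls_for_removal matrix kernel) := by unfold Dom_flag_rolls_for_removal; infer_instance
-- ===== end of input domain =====

-- B drops A's padded-matrix buffer and the intermediate convolved matrix: one fused pass computes each
-- cell's bounds-checked convolution sum and flags it immediately (objective: simpler; same asymptotic cost).

-- ===== PORT A =====
-- helper: literal port of A's `convolve`; list indexing is via getD, exact on Pre_ (all indices are
-- nonnegative and in range there; where Python raises IndexError is excluded by Pre_).
def pvConvolve (matrix : List (List Int)) (kernel : List (List Int)) : List (List Int) :=
  let m_rows := matrix.length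
  let m_cols := if 0 < m_rows then (matrix.headD []).length else 0
  let k_rows := kernel.length
  let k_cols := if 0 < k_rows then (kernel.headD []).length else 0
  let pad_height := k_rows / 2
  let pad_width := k_cols / 2
  let padded_matrix :=
    (List.range pad_height).map (fun _ => List.replicate (m_cols + 2 * pad_width) (0 : Int))
      ++ matrix.map (fun row => List.replicate pad_width (0 : Int) ++ row ++ List.replicate pad_width (0 : Int))
      ++ (List.range pad_height).map (fun _ => List.replicate (m_cols + 2 * pad_width) (0 : Int))
  let output := (List.range m_rows).map (fun _ => (List.range m_cols).map (fun _ => (0 : Int)))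
  (List.range m_rows).foldl (fun output i =>
    (List.range m_cols).foldl (fun output j =>
      let conv_sum := (List.range k_rows).foldl (fun s ki =>
        (List.range k_cols).foldl (fun s kj =>
          s + ((padded_matrix.getD (i + ki) []).getD (j + kj) 0) * ((kernel.getD ki []).getD kj 0)) s) 0
      output.set i ((output.getD i []).set j conv_sum)) output) output

def flag_rolls_for_removal (matrix : List (List Int)) (kernel : List (List Int)) : List (List Bool) :=
  let convolved := pvConvolve matrix kernel
  let m_rows := matrix.length
  let m_cols := if 0 < m_rows then (matrix.headD []).length else 0
  let removal_flags := (List.range m_rows).map (fun _ => (List.range m_cols).map (fun _ => false))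
  (List.range m_rows).foldl (fun flags i =>
    (List.range m_cols).foldl (fun flags j =>
      if 100 ≤ (convolved.getD i []).getD j 0 ∧ (convolved.getD i []).getD j 0 < 104 then
        flags.set i ((flags.getD i []).set j true)
      else flags) flags) removal_flags

-- ===== PORT B =====
def flag_rolls_for_removal_alt (matrix : List (List Int)) (kernel : List (List Int)) : List (List Bool) :=
  let m_rows := matrix.length
  let m_cols := if 0 < m_rows then (matrix.headD []).length else 0
  let k_rows := kernel.length
  let k_cols := if 0 < k_rows then (kernel.headD []).length else 0
  let pad_height := k_rows / 2
  let pad_width := k_cols / 2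
  (List.range m_rows).map (fun (i : Nat) =>
    (List.range m_cols).map (fun (j : Nat) =>
      let conv_sum := (List.range k_rows).foldl (fun s (ki : Nat) =>
        let r : Int := (i : Int) + (ki : Int) - (pad_height : Int)
        if 0 ≤ r ∧ r < (m_rows : Int) then
          let row := matrix.getD r.toNat []
          (List.range k_cols).foldl (fun s (kj : Nat) =>
            let c : Int := (j : Int) + (kj : Int) - (pad_width : Int)
            if 0 ≤ c ∧ c < (row.length : Int) then
              s + row.getD c.toNat 0 * ((kernel.getD ki []).getD kj 0)
            else s) s
        else s) 0
      decide (100 ≤ conv_sum ∧ conv_sum < 104)))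

-- ===== PRECONDITION & SPEC =====
-- Pre_ excludes exactly the inputs on which Python A raises IndexError: a kernel row shorter than the
-- first kernel row, or a matrix row too short for the padded window the loops read.
def Pre_flag_rolls_for_removal (matrix : List (List Int)) (kernel : List (List Int)) : Prop :=
  matrix.length = 0 ∨ (matrix.headD []).length = 0 ∨ kernel.length = 0 ∨ (kernel.headD []).length = 0 ∨
    ((∀ row ∈ kernel, (kernel.headD []).length ≤ row.length) ∧
     (∀ row ∈ matrix,
        (matrix.headD []).length + (kernel.headD []).length - 1 ≤ row.length + 2 * ((kernel.headD []).length / 2)))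
instance (matrix : List (List Int)) (kernel : List (List Int)) : Decidable (Pre_flag_rolls_for_removal matrix kernel) := by unfold Pre_flag_rolls_for_removal; infer_instance

def pvWitness_flag_rolls_for_removal : List (List Int) × List (List Int) :=
  ([[50, 50], [50, 3]], [[1, 0], [0, 1]])

def Spec_flag_rolls_for_removal (matrix : List (List Int)) (kernel : List (List Int)) (out : List (List Bool)) : Prop := out = flag_rolls_for_removal_alt matrix kernel
instance (matrix : List (List Int)) (kernel : List (List Int)) (out : List (List Bool)) : Decidable (Spec_flag_rolls_for_removal matrix kernel out) := by unfold Spec_flag_rolls_for_removal; infer_instance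

-- ===== CLAIM (what is proved, stated in full; the proofs are below) =====
def Claim_equal_flag_rolls_for_removal : Prop := ∀ (matrix : List (List Int)) (kernel : List (List Int)), Dom_flag_rolls_for_removal matrix kernel → Pre_flag_rolls_for_removal matrix kernel → Spec_flag_rolls_for_removal matrix kernel (flag_rolls_for_removal matrix kernel)

-- ===== LEMMAS AND PROOFS =====

/-- foldl congruence under an invariant preserved by the fold. -/
lemma pv_foldl_congr_inv {α β : Type} (P : α → Prop) {f g : α → β → α} :
    ∀ (l : List β) (a : α), P a → (∀ x b, b ∈ l → P x → P (f x b)) →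
      (∀ x b, b ∈ l → P x → f x b = g x b) → l.foldl f a = l.foldl g a := by
  intro l
  induction l with
  | nil => intro a _ _ _; rfl
  | cons b l ih =>
    intro a hP hpres heq
    simp only [List.foldl_cons]
    rw [← heq a b (by simp) hP]
    exact ih (f a b) (hpres a b (by simp) hP)
      (fun x c hc hx => hpres x c (by simp [hc]) hx)
      (fun x c hc hx => heq x c (by simp [hc]) hx)

/-- A fold that repeatedly rewrites position `i` of a list equals one `set` of the folded row. -/
lemma pv_foldl_lift_set {ρ β : Type} (d : ρ) (u : ρ → β → ρ) :
    ∀ (js : List β) (M : List ρ) (i : Nat), i < M.length →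
      js.foldl (fun M j => M.set i (u (M.getD i d) j)) M = M.set i (js.foldl u (M.getD i d)) := by
  intro js
  induction js with
  | nil =>
    intro M i hi
    simp only [List.foldl_nil]
    rw [List.getD_eq_getElem M d hi]
    exact (List.set_getElem_self hi).symm
  | cons j js ih =>
    intro M i hi
    simp only [List.foldl_cons]
    rw [ih (M.set i (u (M.getD i d) j)) i (by simpa using hi)]
    rw [List.set_set]
    congr 1
    congr 1
    simp [List.getD, hi]

/-- Folding `set j (f j old)` over `range n` on a long-enough list rewrites its prefix pointwise. -/
lemma pv_foldl_range_set {α : Type} (d : α) (f : Nat → α → α) :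
    ∀ (n : Nat) (l : List α), n ≤ l.length →
      (List.range n).foldl (fun r j => r.set j (f j (r.getD j d))) l
        = (List.range n).map (fun j => f j (l.getD j d)) ++ l.drop n := by
  intro n
  induction n with
  | zero => intro l _; simp
  | succ n ih =>
    intro l h
    rw [List.range_succ, List.foldl_append, List.map_append, ih l (by omega)]
    simp only [List.foldl_cons, List.foldl_nil, List.map_cons, List.map_nil]
    have hlen : ((List.range n).map (fun j => f j (l.getD j d))).length = n := by simp
    have hget : ((List.range n).map (fun j => f j (l.getD j d)) ++ l.drop n).getD n d = l.getD n d := by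
      rw [List.getD_append_right _ _ _ _ (by omega), hlen, Nat.sub_self]
      simp [List.getD, List.getElem?_drop]
    rw [hget]
    rw [List.set_append_right _ _ (by omega), hlen, Nat.sub_self]
    have hdrop : l.drop n = l.getD n d :: l.drop (n + 1) := by
      rw [List.getD_eq_getElem l d (by omega)]
      exact List.drop_eq_getElem_cons (by omega)
    rw [hdrop]
    simp

/-- A's zero-init-then-set double loop builds the map-of-maps of the cell function. -/
lemma pv_conv_build (m n : Nat) (cs : Nat → Nat → Int) :
    (List.range m).foldl (fun out i =>
        (List.range n).foldl (fun out j => out.set i ((out.getD i []).set j (cs i j))) out)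
      ((List.range m).map (fun _ => (List.range n).map (fun _ => (0 : Int))))
    = (List.range m).map (fun i => (List.range n).map (fun j => cs i j)) := by
  rw [pv_foldl_congr_inv (fun M => M.length = m)
      (g := fun out i => out.set i ((List.range n).foldl (fun r j => r.set j (cs i j)) (out.getD i [])))
      (List.range m) _ (by simp)
      (by
        intro x b hb hx
        rw [pv_foldl_lift_set [] (fun r j => r.set j (cs b j)) (List.range n) x b
          (by rw [hx]; exact List.mem_range.mp hb)]
        simpa using hx)
      (by
        intro x b hb hx
        exact pv_foldl_lift_set [] (fun r j => r.set j (cs b j)) (List.range n) x b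
          (by rw [hx]; exact List.mem_range.mp hb))]
  rw [pv_foldl_range_set [] (fun i old => (List.range n).foldl (fun r j => r.set j (cs i j)) old) m _ (by simp)]
  have hdrop : ((List.range m).map (fun _ => (List.range n).map (fun _ => (0 : Int)))).drop m = [] := by
    apply List.drop_eq_nil_of_le; simp
  rw [hdrop, List.append_nil]
  apply List.map_congr_left
  intro i hi
  rw [PySem.List.getD_map_range _ _ _ _ (List.mem_range.mp hi)]
  rw [pv_foldl_range_set (0 : Int) (fun j _ => cs i j) n _ (by simp)]
  have hdrop2 : ((List.range n).map (fun _ => (0 : Int))).drop n = [] := by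
    apply List.drop_eq_nil_of_le; simp
  rw [hdrop2, List.append_nil]

/-- A's conditional flag-setting double loop builds the map-of-maps of the condition. -/
lemma pv_flags_build (m n : Nat) (c : Nat → Nat → Prop) [∀ i j, Decidable (c i j)] :
    (List.range m).foldl (fun fl i =>
        (List.range n).foldl (fun fl j =>
          if c i j then fl.set i ((fl.getD i []).set j true) else fl) fl)
      ((List.range m).map (fun _ => (List.range n).map (fun _ => false)))
    = (List.range m).map (fun i => (List.range n).map (fun j => if c i j then true else false)) := by
  have hbody : ∀ (i : Nat), i < m → ∀ (fl : List (List Bool)), fl.length = m →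
      (List.range n).foldl (fun fl j => if c i j then fl.set i ((fl.getD i []).set j true) else fl) fl
        = fl.set i ((List.range n).foldl (fun r j => if c i j then r.set j true else r) (fl.getD i [])) := by
    intro i hi fl hfl
    rw [pv_foldl_congr_inv (fun M => M.length = m)
        (g := fun fl j => fl.set i ((fun r j => if c i j then r.set j true else r) (fl.getD i []) j))
        (List.range n) fl hfl
        (by intro x b _ hx; split <;> simp [hx])
        (by
          intro x b _ hx
          by_cases hc : c i b
          · simp [hc]
          · simp only [hc, if_false]
            rw [List.getD_eq_getElem x [] (by omega)]
            exact (List.set_getElem_self (by omega)).symm)]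
    exact pv_foldl_lift_set [] (fun r j => if c i j then r.set j true else r) (List.range n) fl i (by omega)
  rw [pv_foldl_congr_inv (fun M => M.length = m)
      (g := fun fl i => fl.set i ((List.range n).foldl (fun r j => if c i j then r.set j true else r) (fl.getD i [])))
      (List.range m) _ (by simp)
      (by
        intro x b hb hx
        rw [hbody b (List.mem_range.mp hb) x hx]; simpa using hx)
      (by intro x b hb hx; exact hbody b (List.mem_range.mp hb) x hx)]
  rw [pv_foldl_range_set [] (fun i old => (List.range n).foldl (fun r j => if c i j then r.set j true else r) old) m _ (by simp)]
  have hdrop : ((List.range m).map (fun _ => (List.range n).map (fun _ => false))).drop m = [] := by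
    apply List.drop_eq_nil_of_le; simp
  rw [hdrop, List.append_nil]
  apply List.map_congr_left
  intro i hi
  rw [PySem.List.getD_map_range _ _ _ _ (List.mem_range.mp hi)]
  rw [pv_foldl_congr_inv (fun r => r.length = n)
      (g := fun r j => r.set j ((fun j old => if c i j then true else old) j (r.getD j false)))
      (List.range n) _ (by simp)
      (by intro x b _ hx; split <;> simp [hx])
      (by
        intro x b hb hx
        by_cases hc : c i b
        · simp [hc]
        · simp only [hc, if_false]
          rw [List.getD_eq_getElem x false (by rw [hx]; exact List.mem_range.mp hb)]
          exact (List.set_getElem_self _).symm)]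
  rw [pv_foldl_range_set false (fun j old => if c i j then true else old) n _ (by simp)]
  have hdrop2 : ((List.range n).map (fun _ => false)).drop n = [] := by
    apply List.drop_eq_nil_of_le; simp
  rw [hdrop2, List.append_nil]
  apply List.map_congr_left
  intro j hj
  rw [PySem.List.getD_map_range _ _ _ _ (List.mem_range.mp hj)]

lemma pv_zrow_getD (k q : Nat) : (List.replicate k (0 : Int)).getD q 0 = 0 := by
  simp [List.getD, List.getElem?_replicate]; split <;> simp

lemma pv_prow_getD (row : List Int) (pw q : Nat) :
    (List.replicate pw (0 : Int) ++ row ++ List.replicate pw (0 : Int)).getD q 0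
      = if pw ≤ q ∧ q < pw + row.length then row.getD (q - pw) 0 else 0 := by
  set a := List.replicate pw (0 : Int) with ha
  by_cases h2 : q < pw + row.length
  · rw [List.getD_append (a ++ row) a 0 q (by simp [ha]; omega)]
    by_cases h1 : q < pw
    · rw [List.getD_append a row 0 q (by simp [ha]; omega), ha, pv_zrow_getD, if_neg (by omega)]
    · rw [List.getD_append_right a row 0 q (by simp [ha]; omega), if_pos (by omega), ha]
      simp only [List.length_replicate]
  · rw [List.getD_append_right (a ++ row) a 0 q (by simp [ha]; omega), ha, pv_zrow_getD, if_neg (by omega)]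

/-- value of A's padded matrix at (p, q): the original cell when (p, q) is over it, 0 otherwise. -/
lemma pv_padA (matrix : List (List Int)) (mc pw ph p q : Nat) :
    ((((List.range ph).map (fun _ => List.replicate (mc + 2 * pw) (0 : Int))
        ++ matrix.map (fun row => List.replicate pw (0 : Int) ++ row ++ List.replicate pw (0 : Int))
        ++ (List.range ph).map (fun _ => List.replicate (mc + 2 * pw) (0 : Int))).getD p []).getD q 0)
    = if ph ≤ p ∧ p < ph + matrix.length ∧ pw ≤ q ∧ q < pw + (matrix.getD (p - ph) []).length
      then (matrix.getD (p - ph) []).getD (q - pw) 0 else 0 := by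
  set top := (List.range ph).map (fun _ => List.replicate (mc + 2 * pw) (0 : Int)) with htop
  set mid := matrix.map (fun row => List.replicate pw (0 : Int) ++ row ++ List.replicate pw (0 : Int)) with hmid
  have hmidget : ∀ k, k < matrix.length →
      mid.getD k [] = List.replicate pw (0 : Int) ++ matrix.getD k [] ++ List.replicate pw (0 : Int) := by
    intro k hk
    rw [hmid, List.getD_eq_getElem _ _ (by simpa using hk), List.getElem_map,
      List.getD_eq_getElem matrix [] hk]
  by_cases h2 : p < ph + matrix.length
  · rw [List.getD_append (top ++ mid) top [] p (by simp [htop, hmid]; omega)]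
    by_cases h1 : p < ph
    · rw [List.getD_append top mid [] p (by simp [htop]; omega), htop,
        PySem.List.getD_map_range _ _ _ _ h1, pv_zrow_getD, if_neg (by omega)]
    · rw [List.getD_append_right top mid [] p (by simp [htop]; omega)]
      simp only [htop, List.length_map, List.length_range]
      rw [hmidget (p - ph) (by omega), pv_prow_getD]
      by_cases h4 : pw ≤ q ∧ q < pw + (matrix.getD (p - ph) []).length
      · rw [if_pos h4, if_pos ⟨by omega, h2, h4⟩]
      · rw [if_neg h4, if_neg (by intro hx; exact h4 ⟨hx.2.2.1, hx.2.2.2⟩)]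
  · rw [List.getD_append_right (top ++ mid) top [] p (by simp [htop, hmid]; omega)]
    have hlen2 : (top ++ mid).length = ph + matrix.length := by simp [htop, hmid]
    rw [hlen2, htop]
    by_cases h3 : p - (ph + matrix.length) < ph
    · rw [PySem.List.getD_map_range _ _ _ _ h3, pv_zrow_getD,
        if_neg (fun hx => absurd hx.2.1 h2)]
    · rw [List.getD_eq_default ((List.range ph).map (fun _ => List.replicate (mc + 2 * pw) (0 : Int)))
        [] (by simp; omega), if_neg (fun hx => absurd hx.2.1 h2)]
      rfl

/-- A's padded-matrix convolution sum at (i, j) equals B's bounds-checked sum. -/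
lemma pv_cs (matrix kernel : List (List Int)) (mc pw ph kc : Nat) (i j : Nat) :
    (List.range kernel.length).foldl (fun s ki =>
        (List.range kc).foldl (fun s kj =>
          s + ((((List.range ph).map (fun _ => List.replicate (mc + 2 * pw) (0 : Int))
              ++ matrix.map (fun row => List.replicate pw (0 : Int) ++ row ++ List.replicate pw (0 : Int))
              ++ (List.range ph).map (fun _ => List.replicate (mc + 2 * pw) (0 : Int))).getD (i + ki) []).getD (j + kj) 0)
            * ((kernel.getD ki []).getD kj 0)) s) 0
    = (List.range kernel.length).foldl (fun s (ki : Nat) =>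
        if 0 ≤ (i : Int) + (ki : Int) - (ph : Int) ∧ (i : Int) + (ki : Int) - (ph : Int) < (matrix.length : Int) then
          (List.range kc).foldl (fun s (kj : Nat) =>
            if 0 ≤ (j : Int) + (kj : Int) - (pw : Int) ∧
                (j : Int) + (kj : Int) - (pw : Int) < ((matrix.getD ((i : Int) + (ki : Int) - (ph : Int)).toNat []).length : Int) then
              s + (matrix.getD ((i : Int) + (ki : Int) - (ph : Int)).toNat []).getD ((j : Int) + (kj : Int) - (pw : Int)).toNat 0
                * ((kernel.getD ki []).getD kj 0)
            else s) s
        else s) 0 := by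
  apply pv_foldl_congr_inv (fun _ => True) (List.range kernel.length) 0 trivial
    (fun _ _ _ _ => trivial)
  intro s ki _ _
  by_cases hr : 0 ≤ (i : Int) + (ki : Int) - (ph : Int) ∧
      (i : Int) + (ki : Int) - (ph : Int) < (matrix.length : Int)
  · rw [if_pos hr]
    have htn : ((i : Int) + (ki : Int) - (ph : Int)).toNat = i + ki - ph := by omega
    rw [htn]
    apply pv_foldl_congr_inv (fun _ => True) (List.range kc) s trivial (fun _ _ _ _ => trivial)
    intro s kj _ _
    rw [pv_padA matrix mc pw ph (i + ki) (j + kj)]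
    by_cases hc : 0 ≤ (j : Int) + (kj : Int) - (pw : Int) ∧
        (j : Int) + (kj : Int) - (pw : Int) < ((matrix.getD (i + ki - ph) []).length : Int)
    · rw [if_pos hc]
      have hcn : ((j : Int) + (kj : Int) - (pw : Int)).toNat = j + kj - pw := by omega
      rw [hcn]
      rw [if_pos ⟨by omega, by omega, by omega, by omega⟩]
    · rw [if_neg hc, if_neg (by intro hx; exact hc ⟨by omega, by omega⟩)]
      simp
  · rw [if_neg hr]
    rw [pv_foldl_congr_inv (fun _ => True) (g := fun s (_ : Nat) => s) (List.range kc) s trivial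
      (fun _ _ _ _ => trivial)
      (by
        intro x kj _ _
        rw [pv_padA matrix mc pw ph (i + ki) (j + kj),
          if_neg (by intro hx; exact hr ⟨by omega, by omega⟩)]
        simp)]
    exact List.foldl_fixed _

lemma pv_main (matrix kernel : List (List Int)) :
    flag_rolls_for_removal matrix kernel = flag_rolls_for_removal_alt matrix kernel := by
  simp only [flag_rolls_for_removal, flag_rolls_for_removal_alt, pvConvolve]
  simp only [pv_conv_build]
  simp only [pv_flags_build]
  rw [List.map_eq_map_iff]
  intro i hi
  rw [List.map_eq_map_iff]
  intro j hj
  rw [PySem.List.getD_map_range _ _ _ _ (List.mem_range.mp hi)]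
  rw [PySem.List.getD_map_range _ _ _ _ (List.mem_range.mp hj)]
  rw [pv_cs]
  by_cases h : (100 : Int) ≤ (List.range kernel.length).foldl (fun s (ki : Nat) =>
      if 0 ≤ (i : Int) + (ki : Int) - ((kernel.length / 2 : Nat) : Int) ∧
          (i : Int) + (ki : Int) - ((kernel.length / 2 : Nat) : Int) < (matrix.length : Int) then
        (List.range (if 0 < kernel.length then (kernel.headD []).length else 0)).foldl (fun s (kj : Nat) =>
          if 0 ≤ (j : Int) + (kj : Int) - (((if 0 < kernel.length then (kernel.headD []).length else 0) / 2 : Nat) : Int) ∧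
              (j : Int) + (kj : Int) - (((if 0 < kernel.length then (kernel.headD []).length else 0) / 2 : Nat) : Int) <
                ((matrix.getD ((i : Int) + (ki : Int) - ((kernel.length / 2 : Nat) : Int)).toNat []).length : Int) then
            s + (matrix.getD ((i : Int) + (ki : Int) - ((kernel.length / 2 : Nat) : Int)).toNat []).getD
                  ((j : Int) + (kj : Int) - (((if 0 < kernel.length then (kernel.headD []).length else 0) / 2 : Nat) : Int)).toNat 0
                * ((kernel.getD ki []).getD kj 0)
          else s) s
      else s) 0 ∧ (List.range kernel.length).foldl (fun s (ki : Nat) =>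
      if 0 ≤ (i : Int) + (ki : Int) - ((kernel.length / 2 : Nat) : Int) ∧
          (i : Int) + (ki : Int) - ((kernel.length / 2 : Nat) : Int) < (matrix.length : Int) then
        (List.range (if 0 < kernel.length then (kernel.headD []).length else 0)).foldl (fun s (kj : Nat) =>
          if 0 ≤ (j : Int) + (kj : Int) - (((if 0 < kernel.length then (kernel.headD []).length else 0) / 2 : Nat) : Int) ∧
              (j : Int) + (kj : Int) - (((if 0 < kernel.length then (kernel.headD []).length else 0) / 2 : Nat) : Int) <
                ((matrix.getD ((i : Int) + (ki : Int) - ((kernel.length / 2 : Nat) : Int)).toNat []).length : Int) then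
            s + (matrix.getD ((i : Int) + (ki : Int) - ((kernel.length / 2 : Nat) : Int)).toNat []).getD
                  ((j : Int) + (kj : Int) - (((if 0 < kernel.length then (kernel.headD []).length else 0) / 2 : Nat) : Int)).toNat 0
                * ((kernel.getD ki []).getD kj 0)
          else s) s
      else s) 0 < 104
  · rw [if_pos h]
    exact (Bool.decide_iff _ |>.mpr h).symm
  · rw [if_neg h]
    exact (decide_eq_false h).symm

-- ===== VERDICT (by name: the statement is the Claim_ definition above) =====
theorem flag_rolls_for_removal_spec : Claim_equal_flag_rolls_for_removal := by
  intro matrix kernel _ _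
  unfold Spec_flag_rolls_for_removal
  exact pv_main matrix kernel
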